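-- pv_equiv track=rewrite | github.com/pit-crew/cec-2018-ol-musky | admin/final_report.py | fmt_ledger
-- ===== SOURCE A (Python) =====
-- def fmt_ledger(wk, ledger):
--     if ledger == "":
--         return ""
--     report = "\t{:<8} {:<18} {:>8} {:>8} {:>8}\n".format('week', 'item', 'debit', 'credit', 'balance')
--     bal = 0
--
--     for i in range(len(ledger)):
--         entry = ledger[i]
--         wk = entry["week"]
--         item = entry["item"]
--         debit = int(entry["debit"])
--         credit = int(entry["credit"])
--         bal = bal - debit + credit
--         report += "\t{:<8} {:<18} {:>8} {:>8} {:>8}\n".format(wk, item, debit, credit, bal)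
--     return report
-- ===== SOURCE B (Python) =====
-- def _running_balances(deltas):
--     total = 0
--     out = []
--     for d in deltas:
--         total += d
--         out.append(total)
--     return out
--
--
-- def fmt_ledger(wk, ledger):
--     if ledger == "":
--         return ""
--     header = "\t{:<8} {:<18} {:>8} {:>8} {:>8}\n".format('week', 'item', 'debit', 'credit', 'balance')
--     rows = [(e["week"], e["item"], int(e["debit"]), int(e["credit"])) for e in ledger]
--     balances = _running_balances(c - d for (_w, _i, d, c) in rows)
--     lines = ["\t{:<8} {:<18} {:>8} {:>8} {:>8}\n".format(w, it, d, c, b)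
--              for (w, it, d, c), b in zip(rows, balances)]
--     return header + "".join(lines)
-- ===== Notes on version B (the rewrite author's own statement) =====
-- stated objective: alternative
-- what changed: A's single index loop threading a (balance, report-string) accumulator is replaced by a phase-separated pipeline: parse all entries into tuples, compute the running balances as a prefix-sum list, then a separate formatting pass zips rows with their precomputed balances and joins the lines after the header.
import Mathlib
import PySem

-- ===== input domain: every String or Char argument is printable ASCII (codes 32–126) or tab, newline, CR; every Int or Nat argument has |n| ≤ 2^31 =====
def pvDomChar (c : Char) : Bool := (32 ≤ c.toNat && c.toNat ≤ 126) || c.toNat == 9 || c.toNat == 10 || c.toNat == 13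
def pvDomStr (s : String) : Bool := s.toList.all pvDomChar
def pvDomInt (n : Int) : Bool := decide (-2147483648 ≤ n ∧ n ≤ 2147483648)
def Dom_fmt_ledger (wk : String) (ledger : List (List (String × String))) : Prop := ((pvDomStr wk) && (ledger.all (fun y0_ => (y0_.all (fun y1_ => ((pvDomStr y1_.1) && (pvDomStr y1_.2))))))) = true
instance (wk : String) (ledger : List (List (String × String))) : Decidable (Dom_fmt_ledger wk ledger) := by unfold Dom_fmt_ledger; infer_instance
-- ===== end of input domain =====

-- B replaces A's single running-balance loop by two phases — parse rows, prefix-sum the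
-- deltas, then a separate formatting pass over the zipped rows — objective: alternative
-- decomposition, same cost.  (Python's `ledger == ""` guard is unreachable for a list
-- argument under the type convention, so neither port carries it.)

-- shared format-string helper: "\t{:<8} {:<18} {:>8} {:>8} {:>8}\n" (both Pythons use this exact spec)
def pvPadLt (s : List Char) (w : Nat) : List Char := s ++ List.replicate (w - s.length) ' '
def pvPadRt (s : List Char) (w : Nat) : List Char := List.replicate (w - s.length) ' ' ++ s
def pvRow (a b c d e : List Char) : List Char :=
  '\t' :: (pvPadLt a 8 ++ ' ' :: (pvPadLt b 18 ++ ' ' :: (pvPadRt c 8 ++ ' ' :: (pvPadRt d 8 ++ ' ' :: (pvPadRt e 8 ++ ['\n'])))))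
def pvHeader : List Char :=
  pvRow "week".toList "item".toList "debit".toList "credit".toList "balance".toList

-- ===== PORT A =====
-- A's loop body: entry lookups, int() coercions, balance update, append one row
def fmt_ledger_step (acc : Int × List Char) (entry : List (String × String)) : Int × List Char :=
  let wk := (entry.lookup "week").getD ""
  let item := (entry.lookup "item").getD ""
  let debit := (PySem.Int.ofStr? ((entry.lookup "debit").getD "")).getD 0
  let credit := (PySem.Int.ofStr? ((entry.lookup "credit").getD "")).getD 0
  let bal := acc.1 - debit + credit
  (bal, acc.2 ++ pvRow wk.toList item.toList (PySem.Int.toChars debit) (PySem.Int.toChars credit) (PySem.Int.toChars bal))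

def fmt_ledger (wk : String) (ledger : List (List (String × String))) : String :=
  let st := (PySem.List.pyRange 0 (ledger.length : Int) 1).foldl
    (fun acc i => fmt_ledger_step acc (PySem.List.pyGetD ledger i [])) (0, pvHeader)
  String.ofList st.2

-- ===== PORT B =====
def fmt_ledger_parse (e : List (String × String)) : String × String × Int × Int :=
  ((e.lookup "week").getD "", (e.lookup "item").getD "",
   (PySem.Int.ofStr? ((e.lookup "debit").getD "")).getD 0,
   (PySem.Int.ofStr? ((e.lookup "credit").getD "")).getD 0)

-- running totals of a list of deltas ( _running_balances in Source B )
def fmt_ledger_running (total : Int) : List Int → List Int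
  | [] => []
  | d :: ds => (total + d) :: fmt_ledger_running (total + d) ds

def fmt_ledger_line (p : (String × String × Int × Int) × Int) : List Char :=
  pvRow p.1.1.toList p.1.2.1.toList (PySem.Int.toChars p.1.2.2.1) (PySem.Int.toChars p.1.2.2.2) (PySem.Int.toChars p.2)

def fmt_ledger_alt (wk : String) (ledger : List (List (String × String))) : String :=
  let rows := ledger.map fmt_ledger_parse
  let balances := fmt_ledger_running 0 (rows.map (fun r => r.2.2.2 - r.2.2.1))
  let lines := (rows.zip balances).map fmt_ledger_line
  String.ofList (pvHeader ++ lines.flatten)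

-- ===== PRECONDITION & SPEC =====
-- Pre_ excludes exactly the inputs where Python A raises: an entry missing one of the four
-- keys (KeyError) or whose "debit"/"credit" string is not int()-parsable (ValueError).
def Pre_fmt_ledger (wk : String) (ledger : List (List (String × String))) : Prop :=
  (ledger.all (fun e =>
    (e.lookup "week").isSome && (e.lookup "item").isSome &&
    ((e.lookup "debit").bind PySem.Int.ofStr?).isSome &&
    ((e.lookup "credit").bind PySem.Int.ofStr?).isSome)) = true
instance (wk : String) (ledger : List (List (String × String))) : Decidable (Pre_fmt_ledger wk ledger) := by unfold Pre_fmt_ledger; infer_instance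

def pvWitness_fmt_ledger : String × (List (List (String × String))) :=
  ("w1", [[("week", "w1"), ("item", "apples"), ("debit", "3"), ("credit", "10")]])

def Spec_fmt_ledger (wk : String) (ledger : List (List (String × String))) (out : String) : Prop := out = fmt_ledger_alt wk ledger
instance (wk : String) (ledger : List (List (String × String))) (out : String) : Decidable (Spec_fmt_ledger wk ledger out) := by unfold Spec_fmt_ledger; infer_instance

-- ===== CLAIM (what is proved, stated in full; the proofs are below) =====
def Claim_equal_fmt_ledger : Prop := ∀ (wk : String) (ledger : List (List (String × String))), Dom_fmt_ledger wk ledger → Pre_fmt_ledger wk ledger → Spec_fmt_ledger wk ledger (fmt_ledger wk ledger)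

-- ===== LEMMAS AND PROOFS =====
-- invariant of A's loop: starting from balance `bal` and accumulated text `acc`,
-- the final text is `acc` followed by B's zipped/prefix-summed lines.
theorem fmt_ledger_loop_eq (l : List (List (String × String))) (bal : Int) (acc : List Char) :
    (l.foldl fmt_ledger_step (bal, acc)).2 =
      acc ++ (((l.map fmt_ledger_parse).zip
        (fmt_ledger_running bal ((l.map fmt_ledger_parse).map (fun r => r.2.2.2 - r.2.2.1)))).map
          fmt_ledger_line).flatten := by
  induction l generalizing bal acc with
  | nil => simp
  | cons e l ih =>
    simp only [List.map_cons, fmt_ledger_running, List.zip_cons_cons, List.map_cons,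
      List.flatten_cons, List.foldl_cons]
    have harr : ∀ x y : Int, bal - x + y = bal + (y - x) := fun x y => by ring
    simp only [fmt_ledger_step, fmt_ledger_parse, fmt_ledger_line, harr]
    rw [ih, List.append_assoc]

-- ===== VERDICT (by name: the statement is the Claim_ definition above) =====
theorem fmt_ledger_spec : Claim_equal_fmt_ledger := by
  intro wk ledger _ _
  unfold Spec_fmt_ledger
  show fmt_ledger _ _ = _
  simp only [fmt_ledger, fmt_ledger_alt]
  rw [PySem.List.foldl_pyRange_zero_pyGetD']
  rw [fmt_ledger_loop_eq]
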